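-- pv_equiv track=rewrite | github.com/ucsc-ssl/multiple-snapshot-attack | src/uniform_writes.py | construct_consecutive_changes_dict
-- ===== SOURCE A (Python) =====
-- def construct_consecutive_changes_dict(data):
--     """
--     Calculates the number of blocks changes and tabulates the number of n blocks changed.
--
--     data: raw change data, newline separated, where 1 is a change and 0 is no change
--     """
--     consecutive_changes_dict = {}
--     consecutive_changes = 0
--
--     for i in data:
--         if i == 1:
--             consecutive_changes += 1
--         elif consecutive_changes != 0:
--             if not consecutive_changes in consecutive_changes_dict:
--                 consecutive_changes_dict[consecutive_changes] = 1
--             else: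
--                 consecutive_changes_dict[consecutive_changes] += 1
--
--             consecutive_changes = 0
--
--     # This is needed to capture chains that end because the change record ends.
--     if consecutive_changes != 0:
--         if not consecutive_changes in consecutive_changes_dict:
--             consecutive_changes_dict[consecutive_changes] = 1
--         else:
--             consecutive_changes_dict[consecutive_changes] += 1
--
--     return consecutive_changes_dict
-- ===== SOURCE B (Python) =====
-- def construct_consecutive_changes_dict(data):
--     """
--     Two-phase version: first find the maximal runs of 1s by index scanning
--     (outer loop jumps from run to run, inner loop finds the run's end),
--     then tabulate the run lengths into a dict.
--     """
--     n = len(data)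
--     lengths = []
--     i = 0
--     while i < n:
--         if data[i] == 1:
--             j = i
--             while j < n and data[j] == 1:
--                 j += 1
--             lengths.append(j - i)
--             i = j
--         else:
--             i += 1
--     counts = {}
--     for length in lengths:
--         counts[length] = counts.get(length, 0) + 1
--     return counts
-- ===== Notes on version B (the rewrite author's own statement) =====
-- stated objective: alternative
-- what changed: Replaces A's single pass with a running counter, in-loop flush and post-loop flush by a two-phase algorithm: first extract the list of maximal run lengths of 1s by index scanning, then tabulate that list into the dict with get().
import Mathlib
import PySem

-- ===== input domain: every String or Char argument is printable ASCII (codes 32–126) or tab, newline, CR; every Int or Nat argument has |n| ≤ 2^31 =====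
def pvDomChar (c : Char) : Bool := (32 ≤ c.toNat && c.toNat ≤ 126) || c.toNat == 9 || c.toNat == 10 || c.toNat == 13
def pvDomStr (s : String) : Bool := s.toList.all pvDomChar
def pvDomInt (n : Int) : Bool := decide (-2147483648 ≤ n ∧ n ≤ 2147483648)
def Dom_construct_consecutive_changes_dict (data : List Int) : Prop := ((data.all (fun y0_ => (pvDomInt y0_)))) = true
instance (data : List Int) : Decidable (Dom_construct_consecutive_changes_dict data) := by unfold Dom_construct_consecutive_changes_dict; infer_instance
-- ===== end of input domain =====

-- B extracts the list of maximal run lengths of 1s first and then tabulates it,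
-- instead of A's single pass with a running counter and two flush sites (alternative decomposition, same cost).


-- ===== PORT A =====
-- A's repeated "if not cc in dict: dict[cc] = 1 else: dict[cc] += 1; cc = 0" block,
-- applied to the state when the current value ends a run (it appears verbatim twice in A)
def pvRecordA (s : PySem.Dict Int Int × Int) : PySem.Dict Int Int :=
  if ¬ s.1.contains s.2 then s.1.insert s.2 1 else s.1.insert s.2 (s.1.getD s.2 0 + 1)

-- loop body of A: state = (consecutive_changes_dict, consecutive_changes)
def pvStepA (s : PySem.Dict Int Int × Int) (i : Int) : PySem.Dict Int Int × Int :=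
  if i = 1 then (s.1, s.2 + 1)
  else if s.2 ≠ 0 then (pvRecordA s, 0)
  else s

def construct_consecutive_changes_dict (data : List Int) : List (Int × Int) :=
  let s := data.foldl pvStepA (PySem.Dict.empty, 0)
  -- post-loop flush for a chain that ends with the record
  (if s.2 ≠ 0 then pvRecordA s else s.1).items

-- ===== PORT B =====
-- phase 1 of Source B: the maximal run lengths of 1s; the inner 'while j' loop is the
-- takeWhile/dropWhile split of the remaining list (exact: j - i = length of the run at i)
def pvRuns (data : List Int) : List Int :=
  match data with
  | [] => []
  | x :: xs =>
    if x = 1 then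
      (((x :: xs).takeWhile (fun y => y == 1)).length : Int) ::
        pvRuns ((x :: xs).dropWhile (fun y => y == 1))
    else pvRuns xs
termination_by data.length
decreasing_by
  · simp only [List.dropWhile_cons]
    have : (x == 1) = true := by simp [*]
    simp only [this, if_true]
    exact Nat.lt_succ_of_le (List.length_dropWhile_le _ _)
  · simp

-- phase 2 of Source B: counts[length] = counts.get(length, 0) + 1
def pvBump (d : PySem.Dict Int Int) (L : Int) : PySem.Dict Int Int :=
  d.insert L (d.getD L 0 + 1)

def construct_consecutive_changes_dict_alt (data : List Int) : List (Int × Int) :=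
  ((pvRuns data).foldl pvBump PySem.Dict.empty).items

-- ===== PRECONDITION & SPEC =====
def Spec_construct_consecutive_changes_dict (data : List Int) (out : List (Int × Int)) : Prop := out = construct_consecutive_changes_dict_alt data
instance (data : List Int) (out : List (Int × Int)) : Decidable (Spec_construct_consecutive_changes_dict data out) := by unfold Spec_construct_consecutive_changes_dict; infer_instance

-- ===== CLAIM (what is proved, stated in full; the proofs are below) =====
def Claim_equal_construct_consecutive_changes_dict : Prop := ∀ (data : List Int), Dom_construct_consecutive_changes_dict data → Spec_construct_consecutive_changes_dict data (construct_consecutive_changes_dict data)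

-- ===== LEMMAS AND PROOFS =====

-- run lengths of `data` with a pending run of length cc already open (characterises A's loop state)
def pendRuns (cc : Int) (data : List Int) : List Int :=
  match data with
  | [] => if cc = 0 then [] else [cc]
  | x :: xs => if x = 1 then pendRuns (cc + 1) xs
               else if cc = 0 then pendRuns 0 xs else cc :: pendRuns 0 xs

theorem recordA_eq_bump (d : PySem.Dict Int Int) (cc : Int) : pvRecordA (d, cc) = pvBump d cc := by
  unfold pvRecordA pvBump
  by_cases h : d.contains cc
  · simp [h]
  · simp only [Bool.not_eq_true] at h
    simp [h, PySem.Dict.getD_of_not_contains d (0 : Int) h]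

theorem loopA_eq (data : List Int) : ∀ (d : PySem.Dict Int Int) (cc : Int),
    (let s := data.foldl pvStepA (d, cc);
     if s.2 ≠ 0 then pvRecordA s else s.1)
      = (pendRuns cc data).foldl pvBump d := by
  induction data with
  | nil =>
    intro d cc
    by_cases h : cc = 0
    · simp [pendRuns, h]
    · simp [pendRuns, h, recordA_eq_bump]
  | cons x xs ih =>
    intro d cc
    rw [List.foldl_cons]
    by_cases hx : x = 1
    · rw [show pvStepA (d, cc) x = (d, cc + 1) from by simp [pvStepA, hx]]
      rw [ih d (cc + 1)]
      conv_rhs => rw [pendRuns, if_pos hx]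
    · by_cases hc : cc = 0
      · rw [show pvStepA (d, cc) x = (d, cc) from by simp [pvStepA, hx, hc]]
        rw [ih d cc, hc]
        conv_rhs => rw [pendRuns, if_neg hx, if_pos rfl]
      · rw [show pvStepA (d, cc) x = (pvBump d cc, 0) from by
          simp [pvStepA, hx, hc, recordA_eq_bump]]
        rw [ih (pvBump d cc) 0]
        conv_rhs => rw [pendRuns, if_neg hx, if_neg hc]
        rw [List.foldl_cons]

theorem pend_pos (data : List Int) : ∀ cc : Int, 0 < cc →
    pendRuns cc data
      = (cc + ((data.takeWhile (fun y => y == 1)).length : Int))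
          :: pendRuns 0 (data.dropWhile (fun y => y == 1)) := by
  induction data with
  | nil =>
    intro cc hcc
    have h : ¬ cc = 0 := by omega
    simp [pendRuns, h]
  | cons x xs ih =>
    intro cc hcc
    by_cases hx : x = 1
    · have h1 : (x == 1) = true := by simp [hx]
      rw [List.takeWhile_cons, List.dropWhile_cons]
      simp only [h1, if_true]
      rw [pendRuns, if_pos hx, ih (cc + 1) (by omega)]
      rw [List.length_cons]
      congr 1
      push_cast
      ring
    · have h1 : (x == 1) = false := by simp [hx]
      have h0 : ¬ cc = 0 := by omega
      rw [List.takeWhile_cons, List.dropWhile_cons]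
      simp only [h1, Bool.false_eq_true, if_false]
      rw [pendRuns, if_neg hx, if_neg h0]
      have hx2 : pendRuns 0 (x :: xs) = pendRuns 0 xs := by
        rw [pendRuns, if_neg hx, if_pos rfl]
      rw [hx2]
      simp

theorem pend_zero_eq_runs (data : List Int) : pendRuns 0 data = pvRuns data := by
  induction data using pvRuns.induct with
  | case1 => simp [pendRuns, pvRuns]
  | case2 xs ih =>
    rw [pvRuns, if_pos rfl, ← ih]
    rw [pendRuns, if_pos rfl]
    rw [show (0 : Int) + 1 = 1 from by ring, pend_pos xs 1 (by omega)]
    rw [List.takeWhile_cons, List.dropWhile_cons]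
    simp only [BEq.rfl, if_true, List.length_cons]
    congr 1
    push_cast
    ring
  | case3 x xs hx ih =>
    rw [pvRuns, if_neg hx, ← ih]
    rw [pendRuns, if_neg hx, if_pos rfl]

-- ===== VERDICT (by name: the statement is the Claim_ definition above) =====
theorem construct_consecutive_changes_dict_spec : Claim_equal_construct_consecutive_changes_dict := by
  intro data _
  unfold Spec_construct_consecutive_changes_dict construct_consecutive_changes_dict construct_consecutive_changes_dict_alt
  rw [show (let s := data.foldl pvStepA (PySem.Dict.empty, 0);
        (if s.2 ≠ 0 then pvRecordA s else s.1).items)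
      = ((pendRuns 0 data).foldl pvBump PySem.Dict.empty).items from by
    rw [← loopA_eq data PySem.Dict.empty 0]]
  rw [pend_zero_eq_runs]
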